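-- pv_equiv track=rewrite | github.com/vals/umis | umis/umis.py | _infer_transform_options
-- ===== SOURCE A (Python) =====
-- import collections
--
-- def _infer_transform_options(transform):
--     """
--     figure out what transform options should be by examining the provided
--     regexes for keywords
--     """
--     TransformOptions = collections.namedtuple("TransformOptions",
--                                               ['CB', 'dual_index', 'MB', 'SB'])
--     CB = False
--     dual_index = False
--     SB = False
--     MB = True
--     for rx in transform.values():
--         if not rx:
--             continue
--         if "CB1" in rx:
--             dual_index = True
--         if "SB" in rx:
--             SB = True
--         if "CB" in rx:
--             CB = True
--         if "MB" in rx: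
--             MB = True
--     return TransformOptions(CB=CB, dual_index=dual_index, MB=MB, SB=SB)
-- ===== SOURCE B (Python) =====
-- import collections
--
-- def _infer_transform_options(transform):
--     """
--     figure out what transform options should be by examining the provided
--     regexes for keywords
--     """
--     TransformOptions = collections.namedtuple("TransformOptions",
--                                               ['CB', 'dual_index', 'MB', 'SB'])
--     combined = "\n".join(rx for rx in transform.values() if rx)
--     return TransformOptions(CB="CB" in combined,
--                             dual_index="CB1" in combined,
--                             MB=True,
--                             SB="SB" in combined)
-- ===== Notes on version B (the rewrite author's own statement) =====
-- stated objective: simpler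
-- what changed: Replaces the flag-accumulating loop with one newline-join of all truthy regexes followed by single substring tests on the combined string (MB hardcoded True, as A never clears it); the keyword patterns contain no newline, so no cross-boundary match can arise.
import Mathlib
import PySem

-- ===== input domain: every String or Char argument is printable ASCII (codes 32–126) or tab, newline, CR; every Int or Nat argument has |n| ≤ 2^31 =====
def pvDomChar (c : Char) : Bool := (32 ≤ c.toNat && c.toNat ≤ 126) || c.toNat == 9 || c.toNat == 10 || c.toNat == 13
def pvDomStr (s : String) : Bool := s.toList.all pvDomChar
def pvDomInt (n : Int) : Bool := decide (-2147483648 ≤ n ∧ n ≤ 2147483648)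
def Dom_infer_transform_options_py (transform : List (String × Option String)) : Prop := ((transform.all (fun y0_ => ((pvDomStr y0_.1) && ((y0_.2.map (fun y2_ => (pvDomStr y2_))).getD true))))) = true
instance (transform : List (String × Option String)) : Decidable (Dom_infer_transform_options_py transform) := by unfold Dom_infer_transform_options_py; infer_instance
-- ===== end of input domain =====

-- B replaces A's flag-accumulating loop by one newline-join of the truthy regex values followed by
-- single substring tests (MB is constantly true in A, so B hardcodes it): simpler, same cost.


-- ===== PORT A =====
-- Python's four flag variables (CB, dual_index, MB, SB), updated in the loop's order; `continue` on falsy rx.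
def pvStepA (st : Bool × Bool × Bool × Bool) (rx? : Option String) : Bool × Bool × Bool × Bool :=
  match rx? with
  | none => st
  | some rx =>
    if rx = "" then st
    else
      let di := if PySem.Str.isIn "CB1" rx then true else st.2.1
      let sb := if PySem.Str.isIn "SB" rx then true else st.2.2.2
      let cb := if PySem.Str.isIn "CB" rx then true else st.1
      let mb := if PySem.Str.isIn "MB" rx then true else st.2.2.1
      (cb, di, mb, sb)

-- transform.values() of the Python dict; return order is the namedtuple order (CB, dual_index, MB, SB)
def infer_transform_options_py (transform : List (String × Option String)) : Bool × Bool × Bool × Bool :=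
  ((PySem.Dict.ofList transform).values).foldl pvStepA (false, false, true, false)

-- ===== PORT B =====
-- the generator '(rx for rx in transform.values() if rx)': keep non-None, non-empty values
def pvTruthy (rx? : Option String) : Option String :=
  match rx? with
  | none => none
  | some rx => if rx = "" then none else some rx

def infer_transform_options_py_alt (transform : List (String × Option String)) : Bool × Bool × Bool × Bool :=
  let combined := PySem.Str.join "\n" (((PySem.Dict.ofList transform).values).filterMap pvTruthy)
  (PySem.Str.isIn "CB" combined, PySem.Str.isIn "CB1" combined, true, PySem.Str.isIn "SB" combined)

-- ===== PRECONDITION & SPEC =====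
def Spec_infer_transform_options_py (transform : List (String × Option String)) (out : Bool × Bool × Bool × Bool) : Prop := out = infer_transform_options_py_alt transform
instance (transform : List (String × Option String)) (out : Bool × Bool × Bool × Bool) : Decidable (Spec_infer_transform_options_py transform out) := by unfold Spec_infer_transform_options_py; infer_instance

-- ===== CLAIM (what is proved, stated in full; the proofs are below) =====
def Claim_equal_infer_transform_options_py : Prop := ∀ (transform : List (String × Option String)), Dom_infer_transform_options_py transform → Spec_infer_transform_options_py transform (infer_transform_options_py transform)

-- ===== LEMMAS AND PROOFS =====

-- a substring avoiding the separator element lies wholly inside one side of it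
theorem pv_infix_append_cons_iff {α : Type} (p l1 l2 : List α) (c : α) (hc : c ∉ p) :
    p <:+: l1 ++ c :: l2 ↔ p <:+: l1 ∨ p <:+: l2 := by
  constructor
  · rintro ⟨s, t, h⟩
    by_cases h1 : s.length + p.length ≤ l1.length
    · left
      have hp : s ++ p <+: l1 ++ c :: l2 := ⟨t, by simpa [List.append_assoc] using h⟩
      have htk : s ++ p <+: List.take l1.length (l1 ++ c :: l2) :=
        List.prefix_take_iff.mpr ⟨hp, by simp; omega⟩
      rw [List.take_left] at htk
      exact (List.suffix_append s p).isInfix.trans htk.isInfix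
    · by_cases h2 : l1.length + 1 ≤ s.length
      · right
        have h' : p ++ t = List.drop s.length (l1 ++ c :: l2) := by
          rw [← h, List.append_assoc, List.drop_left]
        rw [List.drop_append, List.drop_eq_nil_of_le (by omega), List.nil_append] at h'
        have hk : s.length - l1.length = (s.length - l1.length - 1) + 1 := by omega
        rw [hk, List.drop_succ_cons] at h'
        have hpre : p <+: List.drop (s.length - l1.length - 1) l2 := ⟨t, h'⟩
        exact hpre.isInfix.trans (List.drop_suffix _ l2).isInfix
      · exfalso
        have hgc : (l1 ++ c :: l2)[l1.length]? = some c := by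
          rw [List.getElem?_append_right (le_refl _)]; simp
        rw [← h, List.append_assoc, List.getElem?_append_right (by omega),
            List.getElem?_append_left (by omega)] at hgc
        exact hc (List.mem_of_getElem? hgc)
  · rintro (h | h)
    · exact h.trans ⟨[], c :: l2, by simp⟩
    · exact h.trans ((List.suffix_cons c l2).trans (List.suffix_append l1 (c :: l2))).isInfix

-- membership of a newline-free pattern in the newline-join ↔ membership in some part
theorem pv_isIn_join_newline (p : List Char) (hne : p ≠ []) (hc : Char.ofNat 10 ∉ p)
    (parts : List (List Char)) :
    PySem.Chars.isIn p (PySem.Chars.join [Char.ofNat 10] parts)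
      = parts.any (fun q => PySem.Chars.isIn p q) := by
  induction parts with
  | nil =>
    simp only [List.any_nil]
    rw [PySem.Chars.isIn_eq_false_iff]
    simp [PySem.Chars.join, List.intercalate, hne]
  | cons q rest ih =>
    cases rest with
    | nil => simp [PySem.Chars.join, List.intercalate]
    | cons r rs =>
      rw [PySem.Chars.join_cons_cons]
      have hsplit : PySem.Chars.isIn p (q ++ [Char.ofNat 10] ++ PySem.Chars.join [Char.ofNat 10] (r :: rs))
          = (PySem.Chars.isIn p q || PySem.Chars.isIn p (PySem.Chars.join [Char.ofNat 10] (r :: rs))) := by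
        rcases h : PySem.Chars.isIn p (q ++ [Char.ofNat 10] ++ PySem.Chars.join [Char.ofNat 10] (r :: rs)) with _ | _
        · rw [PySem.Chars.isIn_eq_false_iff, List.append_assoc, List.singleton_append,
              pv_infix_append_cons_iff p q _ _ hc] at h
          rw [not_or] at h
          symm
          simp [PySem.Chars.isIn_eq_false_iff, h.1, h.2]
        · rw [PySem.Chars.isIn_iff_infix, List.append_assoc, List.singleton_append,
              pv_infix_append_cons_iff p q _ _ hc] at h
          rcases h with h | h
          · symm; simp [(PySem.Chars.isIn_iff_infix p q).mpr h]
          · symm; simp [(PySem.Chars.isIn_iff_infix p _).mpr h]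
      rw [hsplit, ih]
      simp

-- Str-level: a pattern with no newline is in the "\n".join of parts iff it is in some part
theorem pv_any_eq_isIn_join (pat : String) (hne : pat.toList ≠ []) (hc : Char.ofNat 10 ∉ pat.toList)
    (parts : List String) :
    parts.any (fun s => PySem.Str.isIn pat s) = PySem.Str.isIn pat (PySem.Str.join "\n" parts) := by
  have hn : ("\n" : String).toList = [Char.ofNat 10] := by decide
  rw [PySem.Str.isIn_eq, PySem.Str.toList_join, hn,
      pv_isIn_join_newline pat.toList hne hc, List.any_map]
  simp [PySem.Str.isIn_eq, Function.comp_def]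

-- A's loop computes, in each component, the initial flag OR-ed with an ∃-scan of the truthy values
theorem pv_foldA (vals : List (Option String)) (cb di mb sb : Bool) :
    vals.foldl pvStepA (cb, di, mb, sb) =
      (cb || (vals.filterMap pvTruthy).any (fun s => PySem.Str.isIn "CB" s),
       di || (vals.filterMap pvTruthy).any (fun s => PySem.Str.isIn "CB1" s),
       mb || (vals.filterMap pvTruthy).any (fun s => PySem.Str.isIn "MB" s),
       sb || (vals.filterMap pvTruthy).any (fun s => PySem.Str.isIn "SB" s)) := by
  induction vals generalizing cb di mb sb with
  | nil => simp
  | cons hd tl ih =>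
    cases hd with
    | none => simp [List.foldl_cons, pvStepA, pvTruthy, ih]
    | some rx =>
      by_cases hrx : rx = ""
      · simp [List.foldl_cons, pvStepA, pvTruthy, hrx, ih]
      · have hstep : pvStepA (cb, di, mb, sb) (some rx) =
            (if PySem.Str.isIn "CB" rx then true else cb,
             if PySem.Str.isIn "CB1" rx then true else di,
             if PySem.Str.isIn "MB" rx then true else mb,
             if PySem.Str.isIn "SB" rx then true else sb) := by
          simp [pvStepA, hrx]
        have hf : List.filterMap pvTruthy (some rx :: tl) = rx :: List.filterMap pvTruthy tl := by
          simp [pvTruthy, hrx]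
        rw [List.foldl_cons, hstep, ih, hf,
            List.any_cons, List.any_cons, List.any_cons, List.any_cons]
        rcases h1 : PySem.Str.isIn "CB" rx with _ | _ <;>
        rcases h2 : PySem.Str.isIn "CB1" rx with _ | _ <;>
        rcases h3 : PySem.Str.isIn "MB" rx with _ | _ <;>
        rcases h4 : PySem.Str.isIn "SB" rx with _ | _ <;>
        simp_all

-- ===== VERDICT (by name: the statement is the Claim_ definition above) =====
theorem infer_transform_options_py_spec : Claim_equal_infer_transform_options_py := by
  intro transform _
  unfold Spec_infer_transform_options_py infer_transform_options_py infer_transform_options_py_alt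
  rw [pv_foldA]
  rw [pv_any_eq_isIn_join "CB" (by decide) (by decide),
      pv_any_eq_isIn_join "CB1" (by decide) (by decide),
      pv_any_eq_isIn_join "SB" (by decide) (by decide)]
  simp
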